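-- pv_equiv track=rewrite | github.com/Hacker-KM/Leetcode_Hacker_KM | 1402-reducing-dishes/1402-reducing-dishes.py | maxSatisfaction
-- ===== SOURCE A (Python) =====
-- from typing import List
--
-- def maxSatisfaction(satisfaction: List[int]) -> int:
--     satisfaction.sort()
--
--     total_satisfaction = 0
--     max_total_satisfaction = 0
--     num_dishes = len(satisfaction)
--
--     for i in range(num_dishes - 1, -1, -1):
--         if satisfaction[i] > -total_satisfaction:
--             total_satisfaction += satisfaction[i]
--             max_total_satisfaction += total_satisfaction
--         else:
--             break
--
--     return max_total_satisfaction
-- ===== SOURCE B (Python) =====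
-- from typing import List
--
-- def maxSatisfaction(satisfaction: List[int]) -> int:
--     # DP over the sorted array: row[c] = best total from the current suffix
--     # when c dishes are already placed (next multiplier c+1).
--     satisfaction.sort()
--     n = len(satisfaction)
--     row = [0] * (n + 1)
--     for i in range(n - 1, -1, -1):
--         row = [max(row[c], satisfaction[i] * (c + 1) + row[c + 1]) for c in range(n)] + [row[n]]
--     return row[0]
-- ===== Notes on version B (the rewrite author's own statement) =====
-- stated objective: alternative
-- what changed: Replaces the greedy break-early scan over the sorted array with a bottom-up dynamic-programming table row[c] = best satisfaction from the current suffix with c dishes already placed; the answer is the first entry of the final row.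
import Mathlib
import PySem

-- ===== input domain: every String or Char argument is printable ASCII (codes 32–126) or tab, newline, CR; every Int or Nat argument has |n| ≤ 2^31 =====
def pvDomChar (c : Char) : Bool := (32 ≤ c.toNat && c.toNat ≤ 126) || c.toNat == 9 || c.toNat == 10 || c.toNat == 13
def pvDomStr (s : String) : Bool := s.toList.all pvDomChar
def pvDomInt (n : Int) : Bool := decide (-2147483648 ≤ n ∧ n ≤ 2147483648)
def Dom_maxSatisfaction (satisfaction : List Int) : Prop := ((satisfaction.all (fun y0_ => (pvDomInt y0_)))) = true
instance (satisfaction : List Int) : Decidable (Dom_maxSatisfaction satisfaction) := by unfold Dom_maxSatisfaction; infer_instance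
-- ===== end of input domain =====

-- B replaces A's greedy break-early scan with a bottom-up DP table; objective: alternative (not faster).
-- Both Pythons sort their argument in place (same mutation); the equivalence proved here is about the return value.

-- ===== PORT A =====
-- the loop 'for i in range(n-1,-1,-1)' with break, as countdown recursion; the
-- Nat argument is i+1 (indices i, i-1, …, 0 remain); index always in range, getD 0 unreachable
def loopA (s : List Int) : Nat → Int → Int → Int
  | 0, _, mx => mx
  | k+1, tot, mx =>
    let v := (PySem.List.pyGet? s (k : Int)).getD 0
    if v > -tot then loopA s k (tot + v) (mx + tot + v) else mx

def maxSatisfaction (satisfaction : List Int) : Int :=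
  let a := PySem.List.sorted satisfaction id false
  loopA a a.length 0 0

-- ===== PORT B =====
-- one DP-row update: row'[c] = max(row[c], x*(c+1) + row[c+1]) for c in range(n), plus kept row[n]
def stepB (x : Int) (n : Nat) (row : List Int) : List Int :=
  ((List.range n).map (fun c => max (row.getD c 0) (x * ((c : Int) + 1) + row.getD (c+1) 0))) ++ [row.getD n 0]

-- row after j iterations of the loop 'for i in range(n-1,-1,-1)' (iteration j uses index n-1-j)
def rowsB (s : List Int) (n : Nat) : Nat → List Int
  | 0 => List.replicate (n+1) 0
  | j+1 => stepB ((PySem.List.pyGet? s ((n - (j+1) : Nat) : Int)).getD 0) n (rowsB s n j)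

def maxSatisfaction_alt (satisfaction : List Int) : Int :=
  let a := PySem.List.sorted satisfaction id false
  (PySem.List.pyGet? (rowsB a a.length a.length) 0).getD 0

-- ===== PRECONDITION & SPEC =====
def Spec_maxSatisfaction (satisfaction : List Int) (out : Int) : Prop := out = maxSatisfaction_alt satisfaction
instance (satisfaction : List Int) (out : Int) : Decidable (Spec_maxSatisfaction satisfaction out) := by unfold Spec_maxSatisfaction; infer_instance

-- ===== CLAIM (what is proved, stated in full; the proofs are below) =====
def Claim_equal_maxSatisfaction : Prop := ∀ (satisfaction : List Int), Dom_maxSatisfaction satisfaction → Spec_maxSatisfaction satisfaction (maxSatisfaction satisfaction)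

-- ===== LEMMAS AND PROOFS =====

-- max value of choosing a subset of xs (ascending) when c dishes are already placed (what B's DP computes)
def g : List Int → Nat → Int
  | [], _ => 0
  | x :: xs, c => max (g xs c) (x * ((c : Int) + 1) + g xs (c+1))

-- value of taking ALL of xs with multipliers c+1, c+2, …
def tv : List Int → Nat → Int
  | [], _ => 0
  | x :: xs, c => x * ((c : Int) + 1) + tv xs (c+1)

-- max of tv over all suffixes of xs
def best : List Int → Nat → Int
  | [], _ => 0
  | x :: xs, c => max (best xs c) (tv (x :: xs) c)

-- max over prefixes of d of the sum of running totals starting from t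
def mss : List Int → Int → Int
  | [], _ => 0
  | x :: d, t => max 0 ((t + x) + mss d (t + x))

-- A's greedy on the descending list
def grd : List Int → Int → Int
  | [], _ => 0
  | x :: d, t => if x > -t then (t + x) + grd d (t + x) else 0

-- sum of the running totals over the whole list
def sumAll : List Int → Int → Int
  | [], _ => 0
  | x :: d, t => (t + x) + sumAll d (t + x)

theorem mss_nonneg (d : List Int) (t : Int) : 0 ≤ mss d t := by
  cases d with
  | nil => simp [mss]
  | cons x d => simp [mss]

theorem mss_zero (d : List Int) (t : Int) (ht : t ≤ 0) (hd : ∀ z ∈ d, z ≤ 0) : mss d t = 0 := by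
  induction d generalizing t with
  | nil => rfl
  | cons x d ih =>
    have hx : x ≤ 0 := hd x (by simp)
    have h' : mss d (t + x) = 0 := ih (t + x) (by omega) (fun z hz => hd z (by simp [hz]))
    simp [mss, h']
    omega

theorem grd_eq_mss (d : List Int) (t : Int) (ht : 0 ≤ t) (hd : d.Pairwise (· ≥ ·)) :
    grd d t = mss d t := by
  induction d generalizing t with
  | nil => rfl
  | cons x d ih =>
    rcases List.pairwise_cons.mp hd with ⟨hx, hd'⟩
    by_cases h : x > -t
    · have h1 : grd d (t + x) = mss d (t + x) := ih (t + x) (by omega) hd'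
      have h2 : 0 ≤ (t + x) + mss d (t + x) := by
        have := mss_nonneg d (t + x); omega
      simp [grd, mss, h, h1, max_eq_right h2]
    · have hx0 : x ≤ -t := by omega
      have h0 : mss d (t + x) = 0 := mss_zero d (t + x) (by omega)
        (fun z hz => le_trans (hx z hz) (by omega))
      simp [grd, mss, h, h0]
      omega

theorem tv_le_g (xs : List Int) (c : Nat) : tv xs c ≤ g xs c := by
  induction xs generalizing c with
  | nil => simp [tv, g]
  | cons x xs ih =>
    have := ih (c+1)
    simp only [tv, g]
    refine le_max_of_le_right ?_
    omega

theorem tv_le_best (xs : List Int) (c : Nat) : tv xs c ≤ best xs c := by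
  cases xs with
  | nil => simp [tv, best]
  | cons x xs => exact le_max_right _ _

theorem best_le_g (xs : List Int) (c : Nat) : best xs c ≤ g xs c := by
  induction xs generalizing c with
  | nil => simp [best, g]
  | cons x xs ih =>
    simp only [best, g]
    refine max_le (le_max_of_le_left (ih c)) ?_
    refine le_max_of_le_right ?_
    simp only [tv]
    have := tv_le_g xs (c+1)
    omega

theorem best_exists (xs : List Int) (c : Nat) : ∃ u, u <:+ xs ∧ best xs c = tv u c := by
  induction xs with
  | nil => exact ⟨[], List.suffix_refl _, rfl⟩
  | cons x xs ih =>
    rcases ih with ⟨u, hu, he⟩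
    rcases le_total (tv (x :: xs) c) (best xs c) with h | h
    · exact ⟨u, hu.trans (List.suffix_cons x xs), by
        show max (best xs c) (tv (x :: xs) c) = tv u c
        rw [max_eq_left h]; exact he⟩
    · exact ⟨x :: xs, List.suffix_refl _, by
        show max (best xs c) (tv (x :: xs) c) = tv (x :: xs) c
        rw [max_eq_right h]⟩

theorem suffix_le (xs u : List Int) (x : Int) (c : Nat) (hu : u <:+ xs)
    (hs : (x :: xs).Pairwise (· ≤ ·)) :
    x * ((c : Int) + 1) + tv u (c+1) ≤ best (x :: xs) c := by
  induction xs generalizing u c x with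
  | nil =>
    have : u = [] := List.suffix_nil.mp hu
    subst this
    simp [best, tv]
  | cons y ys ih =>
    rcases List.pairwise_cons.mp hs with ⟨hx, hys⟩
    rcases List.suffix_cons_iff.mp hu with h | h
    · subst h
      exact tv_le_best (x :: y :: ys) c
    · have h1 : y * ((c : Int) + 1) + tv u (c+1) ≤ best (y :: ys) c := ih u y c h hys
      have hxy : x ≤ y := hx y (by simp)
      have h2 : x * ((c : Int) + 1) + tv u (c+1) ≤ y * ((c : Int) + 1) + tv u (c+1) := by
        have hc : (0 : Int) ≤ (c : Int) + 1 := by positivity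
        nlinarith
      calc x * ((c : Int) + 1) + tv u (c+1) ≤ best (y :: ys) c := le_trans h2 h1
        _ ≤ best (x :: y :: ys) c := le_max_left _ _

theorem g_eq_best (xs : List Int) (c : Nat) (hs : xs.Pairwise (· ≤ ·)) : g xs c = best xs c := by
  induction xs generalizing c with
  | nil => rfl
  | cons x xs ih =>
    rcases List.pairwise_cons.mp hs with ⟨hx, hxs⟩
    refine le_antisymm ?_ (best_le_g _ _)
    simp only [g]
    refine max_le (le_trans (le_of_eq (ih c hxs)) (le_max_left _ _)) ?_
    rcases best_exists xs (c+1) with ⟨u, hu, he⟩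
    rw [ih (c+1) hxs, he]
    exact suffix_le xs u x c hu hs

theorem sumAll_append (d : List Int) (x t : Int) :
    sumAll (d ++ [x]) t = sumAll d t + (t + d.sum + x) := by
  induction d generalizing t with
  | nil => simp [sumAll]
  | cons y d ih =>
    simp only [List.cons_append, sumAll, ih (t + y), List.sum_cons]
    ring

theorem tv_succ (v : List Int) (c : Nat) : tv v (c+1) = tv v c + v.sum := by
  induction v generalizing c with
  | nil => simp [tv]
  | cons x v ih =>
    simp only [tv, ih (c+1), List.sum_cons]
    push_cast
    ring

theorem sumAll_reverse (u : List Int) : sumAll u.reverse 0 = tv u 0 := by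
  induction u with
  | nil => rfl
  | cons x v ih =>
    have : (x :: v).reverse = v.reverse ++ [x] := by simp
    rw [this, sumAll_append, ih]
    simp only [tv, List.sum_reverse]
    have := tv_succ v 0
    push_cast at *
    omega

theorem mss_append (d : List Int) (x t : Int) :
    mss (d ++ [x]) t = max (mss d t) (sumAll (d ++ [x]) t) := by
  induction d generalizing t with
  | nil => simp [mss, sumAll]
  | cons y d ih =>
    simp only [List.cons_append, mss, sumAll, ih (t + y)]
    rcases le_total (mss d (t + y)) (sumAll (d ++ [x]) (t + y)) with h | h <;>
      rcases le_total (mss d (t+y)) 0 with h0 | h0 <;>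
      · have := mss_nonneg d (t + y)
        omega

theorem mss_reverse_eq_best (s : List Int) : mss s.reverse 0 = best s 0 := by
  induction s with
  | nil => rfl
  | cons x xs ih =>
    have h : (x :: xs).reverse = xs.reverse ++ [x] := by simp
    rw [h, mss_append, ih, ← h, sumAll_reverse]
    rfl

theorem loopA_eq_grd (s : List Int) (k : Nat) (hk : k ≤ s.length) (tot mx : Int) :
    loopA s k tot mx = mx + grd (s.take k).reverse tot := by
  induction k generalizing tot mx with
  | zero => simp [loopA, grd]
  | succ k ih =>
    have hlt : k < s.length := hk
    have htake : (s.take (k+1)).reverse = s[k] :: (s.take k).reverse := by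
      rw [List.take_add_one, List.getElem?_eq_getElem hlt]
      simp
    have hget : (PySem.List.pyGet? s (k : Int)).getD 0 = s[k] := by
      simp [PySem.List.pyGet?_natCast, List.getElem?_eq_getElem hlt]
    rw [htake]
    simp only [loopA, hget, grd]
    by_cases h : s[k] > -tot
    · rw [if_pos h, if_pos h, ih (le_of_lt hlt)]
      ring
    · rw [if_neg h, if_neg h]
      ring

theorem rowsB_getD (s : List Int) (j : Nat) :
    ∀ c : Nat, c + j ≤ s.length →
    (rowsB s s.length j).getD c 0 = g (s.drop (s.length - j)) c := by
  induction j with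
  | zero =>
    intro c hc
    simp [rowsB, List.drop_length, g, List.getD]
  | succ j ih =>
    intro c hc
    have hn : s.length - (j+1) < s.length := by omega
    have hdrop : s.drop (s.length - (j+1)) = s[s.length - (j+1)] :: s.drop (s.length - j) := by
      rw [List.drop_eq_getElem_cons hn, show s.length - (j+1) + 1 = s.length - j by omega]
    have hget : (PySem.List.pyGet? s ((s.length - (j+1) : Nat) : Int)).getD 0
        = s[s.length - (j+1)] := by
      simp [PySem.List.pyGet?_natCast, List.getElem?_eq_getElem hn]
    have hcn : c < s.length := by omega
    have hrow : (stepB s[s.length - (j+1)] s.length (rowsB s s.length j)).getD c 0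
        = max ((rowsB s s.length j).getD c 0)
            (s[s.length - (j+1)] * ((c : Int) + 1) + (rowsB s s.length j).getD (c+1) 0) := by
      unfold stepB
      rw [List.getD_append _ _ _ _ (by simpa using hcn)]
      rw [List.getD_eq_getElem?_getD, List.getElem?_map, List.getElem?_range hcn]
      rfl
    rw [rowsB, hget, hrow, ih c (by omega), ih (c+1) (by omega), hdrop]
    rfl

theorem rowsB_final (s : List Int) : maxSatisfaction_alt s = g (PySem.List.sorted s id false) 0 := by
  set a := PySem.List.sorted s id false with ha
  show (PySem.List.pyGet? (rowsB a a.length a.length) 0).getD 0 = g a 0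
  have h := rowsB_getD a a.length 0 (by omega)
  simp only [Nat.sub_self, List.drop_zero] at h
  rw [← h, List.getD_eq_getElem?_getD]
  have h0 : PySem.List.pyGet? (rowsB a a.length a.length) 0
      = (rowsB a a.length a.length)[(0:Nat)]? := by
    simpa using PySem.List.pyGet?_natCast (xs := rowsB a a.length a.length) (n := 0)
  rw [h0]

theorem maxSatisfaction_eq_grd (s : List Int) :
    maxSatisfaction s = grd (PySem.List.sorted s id false).reverse 0 := by
  unfold maxSatisfaction
  set a := PySem.List.sorted s id false with ha
  rw [loopA_eq_grd a a.length (le_refl _) 0 0, List.take_length]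
  ring

-- ===== VERDICT (by name: the statement is the Claim_ definition above) =====
theorem maxSatisfaction_spec : Claim_equal_maxSatisfaction := by
  intro s _
  unfold Spec_maxSatisfaction
  rw [maxSatisfaction_eq_grd, rowsB_final]
  set a := PySem.List.sorted s id false with ha
  have hsorted : a.Pairwise (· ≤ ·) := by
    have := PySem.List.sorted_pairwise (xs := s) (key := id)
    simpa using this
  have hrev : a.reverse.Pairwise (· ≥ ·) := by
    rw [List.pairwise_reverse]
    exact hsorted
  rw [grd_eq_mss a.reverse 0 (le_refl _) hrev, mss_reverse_eq_best, g_eq_best a 0 hsorted]
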